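-- pv_equiv track=rewrite | github.com/h-lu/java-software-engineering | chapters/week_04/starter_code/solution.py | group_by_grade
-- ===== SOURCE A (Python) =====
-- def group_by_grade(scores_dict):
--     """
--     按等级分组学生
--
--     方法：初始化所有等级列表，遍历填充
--     """
--     # 初始化四个等级的空列表
--     groups = {
--         "优秀": [],
--         "良好": [],
--         "及格": [],
--         "不及格": []
--     }
--
--     # 遍历成绩字典，按等级分组
--     for name, score in scores_dict.items():
--         if score >= 90:
--             groups["优秀"].append(name)
--         elif score >= 80:
--             groups["良好"].append(name)
--         elif score >= 60:
--             groups["及格"].append(name)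
--         else:
--             groups["不及格"].append(name)
--
--     return groups
-- ===== SOURCE B (Python) =====
-- def group_by_grade(scores_dict):
--     # staged passes: one filtering scan per grade band instead of single-pass bucketing
--     items = list(scores_dict.items())
--     return {
--         "优秀": [n for n, s in items if s >= 90],
--         "良好": [n for n, s in items if 80 <= s < 90],
--         "及格": [n for n, s in items if 60 <= s < 80],
--         "不及格": [n for n, s in items if s < 60],
--     }
-- ===== Notes on version B (the rewrite author's own statement) =====
-- stated objective: idiomatic
-- what changed: Replaces the single-pass if/elif bucketing into a mutable pre-keyed dict with four independent filtering passes, one list comprehension per closed grade band, assembled directly into the result dict.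
import Mathlib
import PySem

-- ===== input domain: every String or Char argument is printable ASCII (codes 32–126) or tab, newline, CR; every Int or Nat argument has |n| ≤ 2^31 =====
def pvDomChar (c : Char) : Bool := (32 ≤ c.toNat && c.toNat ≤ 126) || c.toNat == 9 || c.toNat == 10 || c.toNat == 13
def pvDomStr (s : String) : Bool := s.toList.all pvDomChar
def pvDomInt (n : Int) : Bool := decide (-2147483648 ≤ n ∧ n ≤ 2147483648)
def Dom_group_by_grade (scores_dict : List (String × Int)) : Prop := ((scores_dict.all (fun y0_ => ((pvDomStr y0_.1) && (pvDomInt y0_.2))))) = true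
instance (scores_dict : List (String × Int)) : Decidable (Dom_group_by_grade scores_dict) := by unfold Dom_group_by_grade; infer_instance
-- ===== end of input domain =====

-- B replaces A's single-pass if/elif bucketing into a mutable dict with four independent filtering passes, one per grade band (idiomatic alternative, same cost).
-- ===== PORT A =====
def group_by_grade (scores_dict : List (String × Int)) : List (String × List String) :=
  let groups : PySem.Dict String (List String) :=
    ((((PySem.Dict.empty).insert "优秀" []).insert "良好" []).insert "及格" []).insert "不及格" []
  let groups := scores_dict.foldl (fun g p =>
    if p.2 ≥ 90 then g.modify "优秀" [] (· ++ [p.1])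
    else if p.2 ≥ 80 then g.modify "良好" [] (· ++ [p.1])
    else if p.2 ≥ 60 then g.modify "及格" [] (· ++ [p.1])
    else g.modify "不及格" [] (· ++ [p.1])) groups
  groups.items

-- ===== PORT B =====
def group_by_grade_alt (scores_dict : List (String × Int)) : List (String × List String) :=
  [("优秀", (scores_dict.filter (fun p => 90 ≤ p.2)).map Prod.fst),
   ("良好", (scores_dict.filter (fun p => 80 ≤ p.2 ∧ p.2 < 90)).map Prod.fst),
   ("及格", (scores_dict.filter (fun p => 60 ≤ p.2 ∧ p.2 < 80)).map Prod.fst),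
   ("不及格", (scores_dict.filter (fun p => p.2 < 60)).map Prod.fst)]

-- ===== PRECONDITION & SPEC =====
def Spec_group_by_grade (scores_dict : List (String × Int)) (out : List (String × List String)) : Prop := out = group_by_grade_alt scores_dict
instance (scores_dict : List (String × Int)) (out : List (String × List String)) : Decidable (Spec_group_by_grade scores_dict out) := by unfold Spec_group_by_grade; infer_instance

-- ===== CLAIM (what is proved, stated in full; the proofs are below) =====
def Claim_equal_group_by_grade : Prop := ∀ (scores_dict : List (String × Int)), Dom_group_by_grade scores_dict → Spec_group_by_grade scores_dict (group_by_grade scores_dict)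

-- ===== LEMMAS AND PROOFS =====
theorem pv_loops_agree (l : List (String × Int)) (b0 b1 b2 b3 : List String) :
    (l.foldl (fun g p =>
      if p.2 ≥ 90 then g.modify "优秀" [] (· ++ [p.1])
      else if p.2 ≥ 80 then g.modify "良好" [] (· ++ [p.1])
      else if p.2 ≥ 60 then g.modify "及格" [] (· ++ [p.1])
      else g.modify "不及格" [] (· ++ [p.1]))
      (PySem.Dict.mk [("优秀", b3), ("良好", b2), ("及格", b1), ("不及格", b0)])).items
    = [("优秀", b3 ++ (l.filter (fun p => 90 ≤ p.2)).map Prod.fst),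
       ("良好", b2 ++ (l.filter (fun p => 80 ≤ p.2 ∧ p.2 < 90)).map Prod.fst),
       ("及格", b1 ++ (l.filter (fun p => 60 ≤ p.2 ∧ p.2 < 80)).map Prod.fst),
       ("不及格", b0 ++ (l.filter (fun p => p.2 < 60)).map Prod.fst)] := by
  induction l generalizing b0 b1 b2 b3 with
  | nil => simp
  | cons p t ih =>
    obtain ⟨n, s⟩ := p
    simp only [List.foldl_cons]
    by_cases h90 : s ≥ 90
    · have hm : PySem.Dict.modify (PySem.Dict.mk [("优秀", b3), ("良好", b2), ("及格", b1), ("不及格", b0)]) "优秀" [] (· ++ [n])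
          = PySem.Dict.mk [("优秀", b3 ++ [n]), ("良好", b2), ("及格", b1), ("不及格", b0)] := by
        simp [PySem.Dict.modify, PySem.Dict.contains, PySem.Dict.get?, PySem.Dict.getD, PySem.Dict.insert]
      simp only [h90, if_pos, hm]
      rw [ih]
      have h1 : ¬ s < 90 := by omega
      have h2 : ¬ (60 ≤ s ∧ s < 80) := by omega
      have h3 : ¬ s < 60 := by omega
      simp [h90, h1, h2, h3, List.append_assoc]
    · by_cases h80 : s ≥ 80
      · have hm : PySem.Dict.modify (PySem.Dict.mk [("优秀", b3), ("良好", b2), ("及格", b1), ("不及格", b0)]) "良好" [] (· ++ [n])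
            = PySem.Dict.mk [("优秀", b3), ("良好", b2 ++ [n]), ("及格", b1), ("不及格", b0)] := by
          simp [PySem.Dict.modify, PySem.Dict.contains, PySem.Dict.get?, PySem.Dict.getD, PySem.Dict.insert]
        simp only [h90, h80, if_neg, if_pos, not_false_eq_true, hm]
        rw [ih]
        have h1 : s < 90 := by omega
        have h2 : ¬ 90 ≤ s := by omega
        have h3 : ¬ s < 80 := by omega
        have h4 : ¬ s < 60 := by omega
        simp [h80, h1, h2, h3, h4, List.append_assoc]
      · by_cases h60 : s ≥ 60
        · have hm : PySem.Dict.modify (PySem.Dict.mk [("优秀", b3), ("良好", b2), ("及格", b1), ("不及格", b0)]) "及格" [] (· ++ [n])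
              = PySem.Dict.mk [("优秀", b3), ("良好", b2), ("及格", b1 ++ [n]), ("不及格", b0)] := by
            simp [PySem.Dict.modify, PySem.Dict.contains, PySem.Dict.get?, PySem.Dict.getD, PySem.Dict.insert]
          simp only [h90, h80, h60, if_neg, if_pos, not_false_eq_true, hm]
          rw [ih]
          have h1 : s < 80 := by omega
          have h2 : ¬ 90 ≤ s := by omega
          have h3 : ¬ 80 ≤ s := by omega
          have h4 : ¬ s < 60 := by omega
          simp [h60, h1, h2, h3, h4, List.append_assoc]
        · have hm : PySem.Dict.modify (PySem.Dict.mk [("优秀", b3), ("良好", b2), ("及格", b1), ("不及格", b0)]) "不及格" [] (· ++ [n])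
              = PySem.Dict.mk [("优秀", b3), ("良好", b2), ("及格", b1), ("不及格", b0 ++ [n])] := by
            simp [PySem.Dict.modify, PySem.Dict.contains, PySem.Dict.get?, PySem.Dict.getD, PySem.Dict.insert]
          simp only [h90, h80, h60, if_neg, not_false_eq_true, hm]
          rw [ih]
          have h1 : s < 60 := by omega
          have h2 : ¬ 90 ≤ s := by omega
          have h3 : ¬ 80 ≤ s := by omega
          have h4 : ¬ 60 ≤ s := by omega
          simp [h1, h2, h3, h4, List.append_assoc]

-- ===== VERDICT (by name: the statement is the Claim_ definition above) =====
theorem group_by_grade_spec : Claim_equal_group_by_grade := by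
  intro scores_dict _
  show group_by_grade scores_dict = group_by_grade_alt scores_dict
  have h0 : ((((PySem.Dict.empty).insert "优秀" ([] : List String)).insert "良好" []).insert "及格" []).insert "不及格" []
      = PySem.Dict.mk [("优秀", []), ("良好", []), ("及格", []), ("不及格", [])] := by decide
  unfold group_by_grade group_by_grade_alt
  rw [h0, pv_loops_agree]
  simp
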